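-- pv_equiv track=rewrite | github.com/farhadmohsin/AxiomVerification | smoothed_complexity_codes/codes/two_loop_LP_8_30.py | string2edges
-- ===== SOURCE A (Python) =====
-- def string2edges(gstring, I):
--     m = len(I)
--     edges = []
--     for i in range(len(gstring)):
--         if gstring[i] == '1':
--             e1 = i % m + min(I)
--             e0 = int((i - e1) / m) + min(I)  # before 20210130
--             e0 = int(i / m) + min(I)  # modified 20210130
--             edges.append((e0, e1))
--     return edges
-- ===== SOURCE B (Python) =====
-- def string2edges(gstring, I):
--     # Stream the characters once, maintaining row/col odometer counters
--     # (increment col, wrap to next row at row width m) instead of recovering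
--     # coordinates by division/modulo per hit.
--     if not I:
--         return []
--     m = len(I)
--     mn = min(I)
--     top = mn + m
--     edges = []
--     row = mn
--     col = mn
--     for ch in gstring:
--         if ch == '1':
--             edges.append((row, col))
--         col += 1
--         if col == top:
--             col = mn
--             row += 1
--     return edges
-- ===== Notes on version B (the rewrite author's own statement) =====
-- stated objective: alternative
-- what changed: B streams the characters once while maintaining row/col odometer counters (increment the column, wrap to the next row when it reaches the row width), so it performs no division or modulo at all, whereas A recovers coordinates from the flat index with i//m and i%m on every hit.
-- outside the precondition, e.g. on string2edges('1', []): A raises ZeroDivisionError, B returns []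
import Mathlib
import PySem

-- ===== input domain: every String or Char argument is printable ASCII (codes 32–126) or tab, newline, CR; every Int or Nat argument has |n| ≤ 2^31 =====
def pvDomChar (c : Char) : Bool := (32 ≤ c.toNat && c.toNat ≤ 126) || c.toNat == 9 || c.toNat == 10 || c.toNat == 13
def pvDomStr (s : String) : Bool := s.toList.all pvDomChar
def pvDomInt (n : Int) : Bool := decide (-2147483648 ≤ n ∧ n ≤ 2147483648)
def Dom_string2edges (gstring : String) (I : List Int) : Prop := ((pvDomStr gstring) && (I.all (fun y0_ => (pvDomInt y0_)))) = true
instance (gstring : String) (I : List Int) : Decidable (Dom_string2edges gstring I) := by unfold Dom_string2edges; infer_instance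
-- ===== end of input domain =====

-- B streams the characters once with row/col odometer counters (no division or modulo)
-- instead of A's per-hit div/mod recovery of coordinates — objective: alternative decomposition.

-- ===== PORT A =====
-- A's first assignment to e0 ('before 20210130') is dead code (overwritten before use) and is not ported.
def string2edges (gstring : String) (I : List Int) : List (Int × Int) :=
  let m : Int := I.length
  (PySem.List.pyRange 0 (gstring.toList.length : Int) 1).foldl (fun edges i =>
    if PySem.List.pyGetD gstring.toList i ' ' == '1' then
      let mn : Int := (PySem.List.min? I id).getD 0   -- min(I); raises on [] — those inputs are outside Pre_
      let e1 : Int := PySem.Int.mod i m + mn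
      let e0 : Int := PySem.Int.truncdiv i m + mn     -- int(i / m): trunc division, exact at these magnitudes
      edges ++ [(e0, e1)]
    else edges) []

-- ===== PORT B =====
def string2edges_alt (gstring : String) (I : List Int) : List (Int × Int) :=
  if I = [] then []
  else
    let m : Int := I.length
    let mn : Int := (PySem.List.min? I id).getD 0
    let top : Int := mn + m
    (gstring.toList.foldl (fun (st : List (Int × Int) × Int × Int) ch =>
      let edges := if ch == '1' then st.1 ++ [(st.2.1, st.2.2)] else st.1
      let col := st.2.2 + 1
      if col == top then (edges, st.2.1 + 1, mn) else (edges, st.2.1, col))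
      ([], mn, mn)).1

-- ===== PRECONDITION & SPEC =====
-- Pre_ excludes exactly the inputs where A raises (I = [] with a '1' present: ZeroDivisionError at i % m);
-- A returns normally everywhere else.
def Pre_string2edges (gstring : String) (I : List Int) : Prop :=
  I ≠ [] ∨ '1' ∉ gstring.toList
instance (gstring : String) (I : List Int) : Decidable (Pre_string2edges gstring I) := by
  unfold Pre_string2edges; infer_instance
def pvWitness_string2edges : String × List Int := ("1010", [2, 5])

def Spec_string2edges (gstring : String) (I : List Int) (out : List (Int × Int)) : Prop := out = string2edges_alt gstring I
instance (gstring : String) (I : List Int) (out : List (Int × Int)) : Decidable (Spec_string2edges gstring I out) := by unfold Spec_string2edges; infer_instance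

-- ===== CLAIM (what is proved, stated in full; the proofs are below) =====
def Claim_equal_string2edges : Prop := ∀ (gstring : String) (I : List Int), Dom_string2edges gstring I → Pre_string2edges gstring I → Spec_string2edges gstring I (string2edges gstring I)

-- ===== LEMMAS AND PROOFS =====

-- the common canonical form: hit indices mapped through (idx / m + mn, idx % m + mn)
def pvHitP (s : List Char) : Nat → Bool := fun idx => s.getD idx ' ' == '1'
def pvPair (m : Nat) (mn : Int) : Nat → Int × Int :=
  fun idx => (((idx / m : Nat) : Int) + mn, ((idx % m : Nat) : Int) + mn)

lemma pv_truncdiv_natCast (a b : Nat) :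
    PySem.Int.truncdiv (a : Int) (b : Int) = ((a / b : Nat) : Int) := rfl

lemma pvA_canon (gstring : String) (I : List Int) :
    string2edges gstring I =
      ((List.range gstring.toList.length).filter (pvHitP gstring.toList)).map
        (pvPair I.length ((PySem.List.min? I id).getD 0)) := by
  simp only [string2edges]
  rw [PySem.List.pyRange_zero_nat, List.foldl_map,
      PySem.List.foldl_append_if
        (fun i : Nat => PySem.List.pyGetD gstring.toList (i : Int) ' ' == '1')
        (fun i : Nat => (PySem.Int.truncdiv (i : Int) (I.length : Int) + (PySem.List.min? I id).getD 0,
                         PySem.Int.mod (i : Int) (I.length : Int) + (PySem.List.min? I id).getD 0))]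
  rw [List.nil_append,
      List.filter_congr (fun i _ => by simp [pvHitP] : ∀ i ∈ List.range gstring.toList.length,
        (PySem.List.pyGetD gstring.toList (i : Int) ' ' == '1') = pvHitP gstring.toList i)]
  apply List.map_congr_left
  intro i _
  simp [pvPair, pv_truncdiv_natCast]

-- odometer step: incrementing the flat index advances (div, mod) exactly like the wrap rule
lemma pv_step_wrap (m i : Nat) (hm : 0 < m) (h : i % m + 1 = m) :
    (i + 1) / m = i / m + 1 ∧ (i + 1) % m = 0 := by
  have hd := Nat.div_add_mod i m
  have : i + 1 = m * (i / m + 1) := by rw [Nat.mul_add, Nat.mul_one]; omega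
  constructor
  · rw [this, Nat.mul_div_cancel_left _ hm]
  · rw [this, Nat.mul_mod_right]

lemma pv_step_nowrap (m i : Nat) (hm : 0 < m) (h : i % m + 1 ≠ m) :
    (i + 1) / m = i / m ∧ (i + 1) % m = i % m + 1 := by
  have hd := Nat.div_add_mod i m
  have hlt : i % m < m := Nat.mod_lt _ hm
  have hlt1 : i % m + 1 < m := by omega
  have : i + 1 = m * (i / m) + (i % m + 1) := by omega
  constructor
  · rw [this, Nat.mul_add_div hm, Nat.div_eq_of_lt hlt1, Nat.add_zero]
  · rw [this, Nat.mul_add_mod, Nat.mod_eq_of_lt hlt1]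

-- B's loop invariant: state after the prefix up to flat index i is (emitted pairs, mn + i/m, mn + i%m)
lemma pvB_loop (m : Nat) (hm : 0 < m) (mn : Int) :
    ∀ (t : List Char) (i : Nat) (acc : List (Int × Int)),
      (t.foldl (fun (st : List (Int × Int) × Int × Int) ch =>
        if st.2.2 + 1 == mn + (m : Int) then
          ((if ch == '1' then st.1 ++ [(st.2.1, st.2.2)] else st.1), st.2.1 + 1, mn)
        else ((if ch == '1' then st.1 ++ [(st.2.1, st.2.2)] else st.1), st.2.1, st.2.2 + 1))
        (acc, ((i / m : Nat) : Int) + mn, ((i % m : Nat) : Int) + mn)).1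
      = acc ++ ((List.range' i t.length).filter
          (fun j => t.getD (j - i) ' ' == '1')).map (pvPair m mn) := by
  intro t
  induction t with
  | nil => intro i acc; simp
  | cons a t ih =>
      intro i acc
      simp only [List.foldl_cons, List.length_cons, List.range'_succ, List.filter_cons]
      have hcol : ((((i % m : Nat) : Int) + mn + 1) == mn + (m : Int)) = decide (i % m + 1 = m) := by
        by_cases h : i % m + 1 = m
        · have hZ : ((i % m : Nat) : Int) + 1 = (m : Int) := by exact_mod_cast h
          have hE : ((i % m : Nat) : Int) + mn + 1 = mn + (m : Int) := by omega
          simp only [hE, beq_self_eq_true, h, decide_true]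
        · simp only [decide_eq_false h, beq_eq_false_iff_ne, ne_eq]
          intro hc
          apply h
          have : ((i % m + 1 : Nat) : Int) = (m : Int) := by push_cast at hc ⊢; omega
          exact_mod_cast this
      have hstate : (if ((((i % m : Nat) : Int) + mn + 1) == mn + (m : Int)) then
            ((if a == '1' then acc ++ [(((i / m : Nat) : Int) + mn, ((i % m : Nat) : Int) + mn)] else acc),
              ((i / m : Nat) : Int) + mn + 1, mn)
          else
            ((if a == '1' then acc ++ [(((i / m : Nat) : Int) + mn, ((i % m : Nat) : Int) + mn)] else acc),
              ((i / m : Nat) : Int) + mn, ((i % m : Nat) : Int) + mn + 1)) =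
          ((if a == '1' then acc ++ [(((i / m : Nat) : Int) + mn, ((i % m : Nat) : Int) + mn)] else acc),
            (((i + 1) / m : Nat) : Int) + mn, (((i + 1) % m : Nat) : Int) + mn) := by
        rw [hcol]
        by_cases h : i % m + 1 = m
        · obtain ⟨h1, h2⟩ := pv_step_wrap m i hm h
          simp [h, h1, h2]; ring
        · obtain ⟨h1, h2⟩ := pv_step_nowrap m i hm h
          simp [h, h1, h2]; ring
      rw [hstate, ih (i + 1)]
      have hhead : (a :: t).getD (i - i) ' ' = a := by simp
      have htail : (List.range' (i + 1) t.length).filter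
            (fun j => (a :: t).getD (j - i) ' ' == '1') =
          (List.range' (i + 1) t.length).filter (fun j => t.getD (j - (i + 1)) ' ' == '1') := by
        apply List.filter_congr
        intro j hj
        have := List.mem_range'_1.mp hj
        have hji : i + 1 ≤ j := this.1
        have : j - i = (j - (i + 1)) + 1 := by omega
        rw [this, List.getD_cons_succ]
      rw [hhead, htail]
      by_cases ha : a = '1'
      · simp only [ha, beq_self_eq_true, if_pos, List.map_cons, pvPair]
        rw [List.append_assoc]
        rfl
      · have : (a == '1') = false := by simp [ha]
        simp only [this, if_neg, Bool.false_eq_true, not_false_iff]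

lemma pvB_canon (gstring : String) (I : List Int) (h : I ≠ []) :
    string2edges_alt gstring I =
      ((List.range gstring.toList.length).filter (pvHitP gstring.toList)).map
        (pvPair I.length ((PySem.List.min? I id).getD 0)) := by
  have hm : 0 < I.length := List.length_pos_iff.mpr h
  set mn : Int := (PySem.List.min? I id).getD 0 with hmn
  simp only [string2edges_alt, if_neg h, ← hmn]
  have h0 : (mn : Int) = ((0 / I.length : Nat) : Int) + mn := by simp
  have h0' : (mn : Int) = ((0 % I.length : Nat) : Int) + mn := by simp
  calc (gstring.toList.foldl (fun (st : List (Int × Int) × Int × Int) ch =>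
        if st.2.2 + 1 == mn + (I.length : Int) then
          ((if ch == '1' then st.1 ++ [(st.2.1, st.2.2)] else st.1), st.2.1 + 1, mn)
        else ((if ch == '1' then st.1 ++ [(st.2.1, st.2.2)] else st.1), st.2.1, st.2.2 + 1))
        ([], mn, mn)).1
      = (gstring.toList.foldl (fun (st : List (Int × Int) × Int × Int) ch =>
        if st.2.2 + 1 == mn + (I.length : Int) then
          ((if ch == '1' then st.1 ++ [(st.2.1, st.2.2)] else st.1), st.2.1 + 1, mn)
        else ((if ch == '1' then st.1 ++ [(st.2.1, st.2.2)] else st.1), st.2.1, st.2.2 + 1))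
        ([], ((0 / I.length : Nat) : Int) + mn, ((0 % I.length : Nat) : Int) + mn)).1 := by
        rw [← h0, ← h0']
    _ = [] ++ ((List.range' 0 gstring.toList.length).filter
          (fun j => gstring.toList.getD (j - 0) ' ' == '1')).map (pvPair I.length mn) :=
        pvB_loop I.length hm mn gstring.toList 0 []
    _ = ((List.range gstring.toList.length).filter (pvHitP gstring.toList)).map
          (pvPair I.length mn) := by
        rw [List.nil_append, List.range_eq_range']
        simp only [Nat.sub_zero]
        rfl

-- ===== VERDICT (by name: the statement is the Claim_ definition above) =====
theorem string2edges_spec : Claim_equal_string2edges := by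
  intro gstring I _ hpre
  unfold Spec_string2edges
  rcases Decidable.em (I = []) with hI | hI
  · subst hI
    have hno : '1' ∉ gstring.toList := by
      rcases hpre with h | h
      · exact absurd rfl h
      · exact h
    rw [pvA_canon]
    have : (List.range gstring.toList.length).filter (pvHitP gstring.toList) = [] := by
      apply List.filter_eq_nil_iff.mpr
      intro a ha
      simp only [List.mem_range] at ha
      unfold pvHitP
      have hmem : gstring.toList.getD a ' ' ∈ gstring.toList := by
        rw [List.getD_eq_getElem _ _ ha]; exact List.getElem_mem ha
      simp only [beq_iff_eq]
      intro hc
      exact hno (hc ▸ hmem)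
    rw [this]
    simp [string2edges_alt]
  · rw [pvA_canon, pvB_canon gstring I hI]
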